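-- pv_equiv track=rewrite | github.com/Kemayong-23/zx_tempzyklus_fw | zx_ruler_results_interpreter.py | interpret_get_mode
-- ===== SOURCE A (Python) =====
-- def interpret_get_mode(mode):
--     """
--     This function interprets the hex code of GET_MODE
--     :param mode: mode in Hex code
--     :return:
--     """
--
--     # List to store the interpretation of each single blocks
--     mode_as_bin_string_list = []
--     mode_response = []
--
--     # Define some dictionaries
--
--     # Dictionary (key:value) with operation state
--     mode_dict = {0: "external_dig_modulation_on",
--                  1: "future_use_1",
--                  2: "extern_analog_modulation_on",
--                  3: "OVTMP_shutdown_on",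
--                  4: "fail_out_signalling_on",
--                  5: "fail_in_GPIO_on",
--                  6: "future_use_2",
--                  7: "future_use_3"}
--
--     # Set the return value
--     mode_as_string = "CRC Error"
--
--     if "\x00" in mode:
--         # Set the return value to wrong Hex value
--         mode_as_string = "Wrong Hex value"
--
--     else:
--         # Check if valid mode
--         if len(mode) > 6:
--
--             # Get the mode in Hex
--             mode_hex = mode[2:4]
--             # Get the mode in dezimal
--             mode_as_int = int(mode_hex, base=16)
--             # Get the mode as string
--             mode_as_bin_string = str(bin(mode_as_int))
--
--             # Convert each single character of mode_as_string as element of a list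
--             for character in mode_as_bin_string:
--                 mode_as_bin_string_list.append(character)
--
--             # Reverse the order of the elements in the list before interation
--             mode_as_bin_string_list.reverse()
--
--             # remove "ob" at the End with 2 times pop
--             mode_as_bin_string_list.pop()
--             mode_as_bin_string_list.pop()
--
--             # Search the high bits and get the corresponding status from the dict
--             for mode_key, mode_str in enumerate(mode_as_bin_string_list):
--                 if mode_str == "1":
--                     mode_response.append(mode_dict.get(int(mode_key)))
--
--             mode_as_string = " | ".join(mode_response)
--
--     return mode_as_string
-- ===== SOURCE B (Python) =====
-- MODE_BITS = ("external_dig_modulation_on",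
--              "future_use_1",
--              "extern_analog_modulation_on",
--              "OVTMP_shutdown_on",
--              "fail_out_signalling_on",
--              "fail_in_GPIO_on",
--              "future_use_2",
--              "future_use_3")
--
--
-- def interpret_get_mode(mode):
--     """Interpret the hex code of GET_MODE via direct bit masking."""
--     if "\x00" in mode:
--         return "Wrong Hex value"
--     if len(mode) <= 6:
--         return "CRC Error"
--     mode_as_int = int(mode[2:4], base=16)
--     return " | ".join(name for i, name in enumerate(MODE_BITS) if mode_as_int >> i & 1)
-- ===== Notes on version B (the rewrite author's own statement) =====
-- stated objective: idiomatic
-- what changed: B drops A's build-binary-string/reverse/double-pop/char-scan machinery and reads the parsed byte's bits directly with shift-and-mask over the eight named bits, joining the selected names.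
-- outside the precondition, e.g. on interpret_get_mode('ZXggabc'): A raises ValueError, B raises ValueError
import Mathlib
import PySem

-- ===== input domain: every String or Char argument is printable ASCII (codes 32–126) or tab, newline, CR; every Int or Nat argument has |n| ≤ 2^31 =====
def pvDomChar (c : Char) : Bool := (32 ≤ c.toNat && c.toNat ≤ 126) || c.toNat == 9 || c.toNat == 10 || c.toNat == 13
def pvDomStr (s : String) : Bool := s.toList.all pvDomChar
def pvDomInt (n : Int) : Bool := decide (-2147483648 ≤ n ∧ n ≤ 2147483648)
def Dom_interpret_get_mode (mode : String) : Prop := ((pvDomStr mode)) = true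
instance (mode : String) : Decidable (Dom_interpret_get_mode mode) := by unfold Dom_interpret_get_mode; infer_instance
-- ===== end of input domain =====

-- B replaces A's bin-string build / reverse / double-pop char loop by direct bit masking over the 8 named bits (idiomatic, not claimed faster).

-- ===== PORT A =====
-- the mode_dict literal (keys 0..7)
def pvModeDictA : PySem.Dict Int String :=
  PySem.Dict.mk
  [(0, "external_dig_modulation_on"),
   (1, "future_use_1"),
   (2, "extern_analog_modulation_on"),
   (3, "OVTMP_shutdown_on"),
   (4, "fail_out_signalling_on"),
   (5, "fail_in_GPIO_on"),
   (6, "future_use_2"),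
   (7, "future_use_3")]

-- A's code after 'mode_hex = mode[2:4]': parse, bin-string, reverse, pop twice, scan for '1's, join.
-- none = int() raises ValueError (outside Pre_). '.getD ""' stands for mode_dict.get(k): for the reachable
-- keys 0..7 the dict always hits, so the default is never used inside Pre_.
def pvDecodeA (mode_hex : List Char) : String :=
  match PySem.Int.ofCharsBase? mode_hex 16 with
  | none => ""
  | some mode_as_int =>
    -- str(bin(mode_as_int)); 'for character in …: append'; .reverse(); .pop(); .pop();
    -- then the enumerate scan appending mode_dict.get(key) for every '1'; finally ' | '.join
    PySem.Str.join " | "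
      ((PySem.List.enumerate
          (((PySem.Int.toBinChars0b mode_as_int).foldl
              (fun acc c => acc ++ [c]) []).reverse.dropLast.dropLast)).foldl
        (fun acc p => if p.2 == '1' then acc ++ [(PySem.Dict.get? pvModeDictA p.1).getD ""] else acc)
        [])

def interpret_get_mode (mode : String) : String :=
  if PySem.Str.isIn "\x00" mode then "Wrong Hex value"
  else if 6 < PySem.Str.len mode then
    pvDecodeA (PySem.List.slice mode.toList (some 2) (some 4))         -- mode_hex = mode[2:4]
  else "CRC Error"

-- ===== PORT B =====
def pvModeBits : List String :=
  ["external_dig_modulation_on",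
   "future_use_1",
   "extern_analog_modulation_on",
   "OVTMP_shutdown_on",
   "fail_out_signalling_on",
   "fail_in_GPIO_on",
   "future_use_2",
   "future_use_3"]

-- B's tail: parse, then keep the names whose bit is set ('mode_as_int >> i & 1').
def pvDecodeB (hexPair : List Char) : String :=
  match PySem.Int.ofCharsBase? hexPair 16 with
  | none => ""
  | some v =>
    PySem.Str.join " | "
      (((PySem.List.enumerate pvModeBits).filter
          (fun p => PySem.Int.band (v >>> p.1.toNat) 1 != 0)).map (·.2))

def interpret_get_mode_alt (mode : String) : String :=
  if PySem.Str.isIn "\x00" mode then "Wrong Hex value"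
  else if PySem.Str.len mode ≤ 6 then "CRC Error"
  else pvDecodeB (PySem.List.slice mode.toList (some 2) (some 4))

-- ===== PRECONDITION & SPEC =====
def pvHexChars : List Char := "0123456789abcdefABCDEF".toList
def pvWsChars : List Char := [' ', '\t', '\n', '\r']

-- the 2-char forms int(·, 16) accepts on Dom characters; a leading '-' is excluded below
def pvValidPair (c2 c3 : Char) : Bool :=
  (c2 ∈ pvHexChars && (c3 ∈ pvHexChars || c3 ∈ pvWsChars)) ||
  ((c2 ∈ pvWsChars || c2 == '+') && c3 ∈ pvHexChars)

-- Pre_ excludes (a) mode strings of length > 6 whose byte field mode[2:4] is not accepted by int(·, 16)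
-- (there A raises ValueError), and (b) byte fields made of a minus sign and one hex digit: a negative
-- byte value is outside the fixed hex-frame format, and there A's reading (of the reversed "-0b…" text)
-- and B's reading (of the two's-complement bits) are both defensible — no one would specify either.
def Pre_interpret_get_mode (mode : String) : Prop :=
  ¬ PySem.Str.isIn "\x00" mode = true →
  6 < PySem.Str.len mode →
  pvValidPair (mode.toList.getD 2 ' ') (mode.toList.getD 3 ' ') = true
instance (mode : String) : Decidable (Pre_interpret_get_mode mode) := by
  unfold Pre_interpret_get_mode; infer_instance

def pvWitness_interpret_get_mode : String := "ZX05abc"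

def Spec_interpret_get_mode (mode : String) (out : String) : Prop := out = interpret_get_mode_alt mode
instance (mode : String) (out : String) : Decidable (Spec_interpret_get_mode mode out) := by unfold Spec_interpret_get_mode; infer_instance

-- ===== CLAIM (what is proved, stated in full; the proofs are below) =====
def Claim_equal_interpret_get_mode : Prop := ∀ (mode : String), Dom_interpret_get_mode mode → Pre_interpret_get_mode mode → Spec_interpret_get_mode mode (interpret_get_mode mode)

-- ===== LEMMAS AND PROOFS =====

-- all valid pairs, explicitly
def pvGoodPairs : List (Char × Char) :=
  ((pvHexChars ++ pvWsChars ++ ['+']).product (pvHexChars ++ pvWsChars)).filter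
    (fun p => pvValidPair p.1 p.2)

-- int(·, 16) accepts every valid pair and yields a value in [0, 256)
set_option maxRecDepth 32768 in
lemma pvParse_ok : pvGoodPairs.all (fun p =>
    match PySem.Int.ofCharsBase? [p.1, p.2] 16 with
    | some v => decide (0 ≤ v ∧ v < 256)
    | none => false) = true := by decide

-- A's bin-char positions holding '1' are exactly B's set-bit positions, for every byte value
set_option maxRecDepth 32768 in
lemma pvIdx_eq : (List.range 256).all (fun n =>
    ((PySem.List.pyRange 0 (PySem.List.len (((PySem.Int.toBinChars0b (n:Int)).foldl (fun acc c => acc ++ [c]) []).reverse.dropLast.dropLast)) 1).filter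
        (fun j => PySem.List.pyGetD (((PySem.Int.toBinChars0b (n:Int)).foldl (fun acc c => acc ++ [c]) []).reverse.dropLast.dropLast) j '0' == '1'))
    == ((PySem.List.pyRange 0 8 1).filter (fun j => PySem.Int.band ((n:Int) >>> j.toNat) 1 != 0))) = true := by decide

-- A's dict lookup and B's list of names agree on the positions 0..7
set_option maxRecDepth 32768 in
lemma pvName_eq : (PySem.List.pyRange 0 8 1).all
    (fun j => (PySem.Dict.get? pvModeDictA j).getD "" == PySem.List.pyGetD pvModeBits j "") = true := by decide

lemma pvMem_goodPairs {c2 c3 : Char} (h : pvValidPair c2 c3 = true) : (c2, c3) ∈ pvGoodPairs := by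
  have h' := h
  unfold pvValidPair at h'
  refine List.mem_filter.mpr ⟨List.mem_product.mpr ⟨?_, ?_⟩, h⟩ <;>
  · simp only [Bool.or_eq_true, Bool.and_eq_true, decide_eq_true_iff, beq_iff_eq] at h'
    simp only [List.mem_append, List.mem_singleton]
    tauto

lemma pvDecode_eq {c2 c3 : Char} (h : pvValidPair c2 c3 = true) :
    pvDecodeA [c2, c3] = pvDecodeB [c2, c3] := by
  have hp := List.all_eq_true.mp pvParse_ok _ (pvMem_goodPairs h)
  unfold pvDecodeA pvDecodeB
  cases hparse : PySem.Int.ofCharsBase? [c2, c3] 16 with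
  | none => rfl
  | some v =>
    rw [hparse] at hp
    have hv : 0 ≤ v ∧ v < 256 := of_decide_eq_true hp
    obtain ⟨n, hn, rfl⟩ : ∃ n : Nat, n < 256 ∧ (n : Int) = v :=
      ⟨v.toNat, by omega, Int.toNat_of_nonneg hv.1⟩
    refine congrArg (PySem.Str.join " | ") ?_
    rw [PySem.List.foldl_append_if]
    rw [PySem.List.enumerate_eq_map_pyRange _ '0', PySem.List.enumerate_eq_map_pyRange _ ""]
    rw [List.filter_map, List.filter_map, List.map_map, List.map_map]
    simp only [Function.comp_def]
    have hidx := beq_iff_eq.mp (List.all_eq_true.mp pvIdx_eq n (List.mem_range.mpr hn))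
    have hlen : PySem.List.len pvModeBits = 8 := by decide
    rw [hlen]
    rw [List.nil_append, hidx]
    refine List.map_congr_left (fun j hj => ?_)
    have hj8 : j ∈ PySem.List.pyRange 0 8 1 := List.mem_of_mem_filter hj
    exact beq_iff_eq.mp (List.all_eq_true.mp pvName_eq j hj8)

-- ===== VERDICT (by name: the statement is the Claim_ definition above) =====
theorem interpret_get_mode_spec : Claim_equal_interpret_get_mode := by
  intro mode _ hPre
  unfold Spec_interpret_get_mode interpret_get_mode interpret_get_mode_alt
  split_ifs with h0 h1 h2 h2
  · rfl
  · exact absurd h2 (by omega)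
  · -- the real branch: 6 < len, parse the two sliced characters
    have hvalid := hPre h0 h1
    have hlen' : 6 < mode.toList.length := by simpa [PySem.Str.len_eq] using h1
    obtain ⟨a, b, c2, c3, rest, hl⟩ :
        ∃ a b c2 c3 rest, mode.toList = a :: b :: c2 :: c3 :: rest := by
      match hml : mode.toList with
      | a :: b :: c2 :: c3 :: rest => exact ⟨a, b, c2, c3, rest, rfl⟩
      | [] | [_] | [_, _] | [_, _, _] => simp [hml] at hlen'
    rw [hl] at hvalid ⊢
    have hslice : PySem.List.slice (a :: b :: c2 :: c3 :: rest) (some 2) (some 4) = [c2, c3] := by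
      have := PySem.List.slice_natCast (xs := a :: b :: c2 :: c3 :: rest) (a := 2) (b := 4)
      simpa using this
    rw [hslice]
    exact pvDecode_eq (by simpa [List.getD] using hvalid)
  · rfl
  · exact absurd h2 (by omega)
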